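-- pv_equiv track=rewrite | github.com/lawk-0/adaptive_resume_screener | core/utils.py | compute_skill_gaps
-- ===== SOURCE A (Python) =====
-- from typing import List, Dict, Set
--
-- def compute_skill_gaps(jd_skills: Set[str], cand_skills: Set[str]) -> Dict[str, List[str]]:
--     """
--     Compute:
--     - matched skills
--     - missing skills (required in JD, not in candidate)
--     - extra skills (candidate has, JD didn't mention)
--     """
--     jd_skills_l = {s.lower() for s in jd_skills}
--     cand_skills_l = {s.lower() for s in cand_skills}
--
--     matched = sorted(jd_skills_l & cand_skills_l)
--     missing = sorted(jd_skills_l - cand_skills_l)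
--     extra = sorted(cand_skills_l - jd_skills_l)
--
--     return {
--         "matched": matched,
--         "missing": missing,
--         "extra": extra,
--     }
-- ===== SOURCE B (Python) =====
-- def compute_skill_gaps(jd_skills, cand_skills):
--     # sort-then-merge: sorted deduped lists + one two-pointer merge pass; no set algebra, no final sorts
--     def sort_dedup(skills):
--         xs = sorted(s.lower() for s in skills)
--         out = []
--         for s in xs:
--             if not out or out[-1] != s:
--                 out.append(s)
--         return out
--     jd = sort_dedup(jd_skills)
--     cand = sort_dedup(cand_skills)
--     matched, missing, extra = [], [], []
--     i = j = 0
--     while i < len(jd) and j < len(cand):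
--         if jd[i] == cand[j]:
--             matched.append(jd[i]); i += 1; j += 1
--         elif jd[i] < cand[j]:
--             missing.append(jd[i]); i += 1
--         else:
--             extra.append(cand[j]); j += 1
--     missing.extend(jd[i:])
--     extra.extend(cand[j:])
--     return {"matched": matched, "missing": missing, "extra": extra}
-- ===== Notes on version B (the rewrite author's own statement) =====
-- stated objective: alternative
-- what changed: Replaces the three set-algebra operations plus three sorts by a sort-then-merge algorithm: sort each deduped lowercased list once, then one two-pointer merge pass emits matched/missing/extra already in order.
import Mathlib
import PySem

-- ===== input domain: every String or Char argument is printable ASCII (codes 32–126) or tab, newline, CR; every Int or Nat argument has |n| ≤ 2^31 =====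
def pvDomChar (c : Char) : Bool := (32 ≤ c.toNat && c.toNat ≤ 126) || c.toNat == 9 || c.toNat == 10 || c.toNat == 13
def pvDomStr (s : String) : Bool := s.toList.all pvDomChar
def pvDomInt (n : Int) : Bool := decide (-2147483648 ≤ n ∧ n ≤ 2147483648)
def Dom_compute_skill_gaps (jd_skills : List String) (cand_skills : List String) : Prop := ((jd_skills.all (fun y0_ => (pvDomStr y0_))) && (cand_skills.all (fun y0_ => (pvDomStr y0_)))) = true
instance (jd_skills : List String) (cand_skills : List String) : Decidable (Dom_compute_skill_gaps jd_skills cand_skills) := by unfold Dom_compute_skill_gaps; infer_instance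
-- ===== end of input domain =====

-- B replaces A's three set-algebra operations plus three sorts by sort-then-merge: sorted deduped lists and one two-pointer merge pass emitting matched/missing/extra in order; alternative decomposition.


-- ===== PORT A =====
def compute_skill_gaps (jd_skills : List String) (cand_skills : List String) : List (String × List String) :=
  let jd_skills_l : PySem.Set String := PySem.Set.ofList (jd_skills.map PySem.Str.lower)
  let cand_skills_l : PySem.Set String := PySem.Set.ofList (cand_skills.map PySem.Str.lower)
  let matched := PySem.List.sorted (PySem.Set.inter jd_skills_l cand_skills_l) (fun x => x) false
  let missing := PySem.List.sorted (PySem.Set.diff jd_skills_l cand_skills_l) (fun x => x) false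
  let extra := PySem.List.sorted (PySem.Set.diff cand_skills_l jd_skills_l) (fun x => x) false
  [("matched", matched), ("missing", missing), ("extra", extra)]

-- ===== PORT B =====
-- sort_dedup: sort the lowercased list, then keep each element whose value differs from the last kept one
def pvSortDedup (skills : List String) : List String :=
  let xs := PySem.List.sorted (skills.map PySem.Str.lower) (fun x => x) false
  xs.foldl (fun out s => if out.getLast? = some s then out else out ++ [s]) []

-- the two-pointer while loop: advance through both sorted lists, classifying; the trailing extends are the [],cons base cases
def pvMerge3 : List String → List String → List String × List String × List String
  | [], ys => ([], [], ys)
  | x :: xs, [] => ([], x :: xs, [])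
  | x :: xs, y :: ys =>
    if x = y then
      let r := pvMerge3 xs ys
      (x :: r.1, r.2.1, r.2.2)
    else if x < y then
      let r := pvMerge3 xs (y :: ys)
      (r.1, x :: r.2.1, r.2.2)
    else
      let r := pvMerge3 (x :: xs) ys
      (r.1, r.2.1, y :: r.2.2)
  termination_by xs ys => xs.length + ys.length

def compute_skill_gaps_alt (jd_skills : List String) (cand_skills : List String) : List (String × List String) :=
  let jd := pvSortDedup jd_skills
  let cand := pvSortDedup cand_skills
  let r := pvMerge3 jd cand
  [("matched", r.1), ("missing", r.2.1), ("extra", r.2.2)]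

-- ===== PRECONDITION & SPEC =====
def Spec_compute_skill_gaps (jd_skills : List String) (cand_skills : List String) (out : List (String × List String)) : Prop := out = compute_skill_gaps_alt jd_skills cand_skills
instance (jd_skills : List String) (cand_skills : List String) (out : List (String × List String)) : Decidable (Spec_compute_skill_gaps jd_skills cand_skills out) := by unfold Spec_compute_skill_gaps; infer_instance

-- ===== CLAIM (what is proved, stated in full; the proofs are below) =====
def Claim_equal_compute_skill_gaps : Prop := ∀ (jd_skills : List String) (cand_skills : List String), Dom_compute_skill_gaps jd_skills cand_skills → Spec_compute_skill_gaps jd_skills cand_skills (compute_skill_gaps jd_skills cand_skills)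

-- ===== LEMMAS AND PROOFS =====

-- recursive form of the adjacent-dedup fold
def pvDst : List String → List String
  | [] => []
  | [a] => [a]
  | a :: b :: t => if a = b then pvDst (b :: t) else a :: pvDst (b :: t)

theorem pvFoldl_eq_dst (l : List String) : ∀ (acc : List String) (x : String),
    l.foldl (fun out s => if out.getLast? = some s then out else out ++ [s]) (acc ++ [x])
      = acc ++ pvDst (x :: l) := by
  induction l with
  | nil => intro acc x; simp [pvDst]
  | cons s t ih =>
    intro acc x
    by_cases h : x = s
    · simp [List.foldl_cons, h, pvDst, ih]
    · have : (acc ++ [x]) ++ [s] = (acc ++ [x]) ++ [s] := rfl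
      simp only [List.foldl_cons, List.getLast?_concat]
      rw [if_neg (by simpa [eq_comm] using fun hh => h (Option.some.inj hh).symm)]
      rw [List.append_assoc] at *
      have := ih (acc ++ [x]) s
      simpa [pvDst, h, List.append_assoc] using this

theorem pvSortDedup_eq_dst (skills : List String) :
    pvSortDedup skills = pvDst (PySem.List.sorted (skills.map PySem.Str.lower) (fun x => x) false) := by
  unfold pvSortDedup
  cases h : PySem.List.sorted (skills.map PySem.Str.lower) (fun x => x) false with
  | nil => simp [pvDst]
  | cons x t =>
    have : ([] : List String) ++ [x] = [x] := rfl
    simpa [pvDst] using pvFoldl_eq_dst t [] x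

theorem pvMem_dst (a : String) (l : List String) : a ∈ pvDst l ↔ a ∈ l := by
  induction l using pvDst.induct with
  | case1 => simp [pvDst]
  | case2 b => simp [pvDst]
  | case3 b t ih => simp only [pvDst, reduceIte]; simp only [List.mem_cons] at ih ⊢; tauto
  | case4 b c t h ih => simp [pvDst, h, ih]

theorem pvPairwise_dst (l : List String) (hl : l.Pairwise (· ≤ ·)) :
    (pvDst l).Pairwise (· < ·) := by
  induction l using pvDst.induct with
  | case1 => simp [pvDst]
  | case2 b => simp [pvDst]
  | case3 b t ih =>
    simp only [pvDst, reduceIte]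
    exact ih (hl.sublist (List.sublist_cons_self _ _))
  | case4 b c t h ih =>
    simp only [pvDst, if_neg h]
    refine List.pairwise_cons.2 ⟨?_, ih (hl.sublist (List.sublist_cons_self _ _))⟩
    intro a ha
    have ha' : a ∈ c :: t := (pvMem_dst a (c :: t)).1 ha
    have hb := List.pairwise_cons.1 hl
    have hble : b ≤ a := hb.1 a ha'
    rcases List.mem_cons.1 ha' with rfl | hat
    · exact lt_of_le_of_ne hble h
    · have hbc : b ≤ c := hb.1 c (List.mem_cons_self)
      have hca : c ≤ a := (List.pairwise_cons.1 hb.2).1 a hat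
      exact lt_of_le_of_ne hble (by
        intro rfl'
        exact h (le_antisymm hbc (le_trans hca (le_of_eq rfl'.symm))))

theorem pvSortDedup_pairwise (skills : List String) : (pvSortDedup skills).Pairwise (· < ·) := by
  rw [pvSortDedup_eq_dst]
  exact pvPairwise_dst _ (by simpa using PySem.List.sorted_pairwise (skills.map PySem.Str.lower) (fun x => x))

theorem pvMem_sortDedup (a : String) (skills : List String) :
    a ∈ pvSortDedup skills ↔ a ∈ skills.map PySem.Str.lower := by
  rw [pvSortDedup_eq_dst, pvMem_dst, PySem.List.mem_sorted]

-- unfolded equations of the merge's three recursive branches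
theorem pvMerge3_eq_tie (y : String) (xs ys : List String) :
    pvMerge3 (y :: xs) (y :: ys)
      = (y :: (pvMerge3 xs ys).1, (pvMerge3 xs ys).2.1, (pvMerge3 xs ys).2.2) := by
  simp [pvMerge3]

theorem pvMerge3_eq_lt (x y : String) (xs ys : List String) (hne : ¬ x = y) (hlt : x < y) :
    pvMerge3 (x :: xs) (y :: ys)
      = ((pvMerge3 xs (y :: ys)).1, x :: (pvMerge3 xs (y :: ys)).2.1, (pvMerge3 xs (y :: ys)).2.2) := by
  simp [pvMerge3, hne, hlt]

theorem pvMerge3_eq_gt (x y : String) (xs ys : List String) (hne : ¬ x = y) (hnlt : ¬ x < y) :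
    pvMerge3 (x :: xs) (y :: ys)
      = ((pvMerge3 (x :: xs) ys).1, (pvMerge3 (x :: xs) ys).2.1, y :: (pvMerge3 (x :: xs) ys).2.2) := by
  simp [pvMerge3, hne, hnlt]

-- membership characterisation of the merge on strictly sorted inputs
theorem pvMerge3_mem (a : String) (xs ys : List String) :
    xs.Pairwise (· < ·) → ys.Pairwise (· < ·) →
    ((a ∈ (pvMerge3 xs ys).1 ↔ a ∈ xs ∧ a ∈ ys) ∧
     (a ∈ (pvMerge3 xs ys).2.1 ↔ a ∈ xs ∧ a ∉ ys) ∧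
     (a ∈ (pvMerge3 xs ys).2.2 ↔ a ∈ ys ∧ a ∉ xs)) := by
  induction xs, ys using pvMerge3.induct with
  | case1 ys => intro _ _; simp [pvMerge3]
  | case2 x xs => intro _ _; simp [pvMerge3]
  | case3 xs y ys ih =>
    intro hx hy
    obtain ⟨ih1, ih2, ih3⟩ := ih (List.pairwise_cons.1 hx).2 (List.pairwise_cons.1 hy).2
    have hxgt : ∀ b ∈ xs, y < b := (List.pairwise_cons.1 hx).1
    have hygt : ∀ b ∈ ys, y < b := (List.pairwise_cons.1 hy).1
    rw [pvMerge3_eq_tie]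
    constructor
    · simp only [List.mem_cons, ih1]
      constructor
      · rintro (rfl | ⟨h1, h2⟩)
        · exact ⟨Or.inl rfl, Or.inl rfl⟩
        · exact ⟨Or.inr h1, Or.inr h2⟩
      · rintro ⟨h1, h2⟩
        rcases h1 with rfl | h1
        · exact Or.inl rfl
        · rcases h2 with rfl | h2
          · exact absurd (hxgt _ h1) (lt_irrefl _)
          · exact Or.inr ⟨h1, h2⟩
    constructor
    · rw [ih2]
      constructor
      · rintro ⟨h1, h2⟩
        exact ⟨List.mem_cons_of_mem _ h1, by
          intro hc
          rcases List.mem_cons.1 hc with rfl | hc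
          · exact absurd (hxgt a h1) (lt_irrefl a)
          · exact h2 hc⟩
      · rintro ⟨h1, h2⟩
        rcases List.mem_cons.1 h1 with rfl | h1
        · exact absurd List.mem_cons_self h2
        · exact ⟨h1, fun hc => h2 (List.mem_cons_of_mem _ hc)⟩
    · rw [ih3]
      constructor
      · rintro ⟨h1, h2⟩
        exact ⟨List.mem_cons_of_mem _ h1, by
          intro hc
          rcases List.mem_cons.1 hc with rfl | hc
          · exact absurd (hygt a h1) (lt_irrefl a)
          · exact h2 hc⟩
      · rintro ⟨h1, h2⟩
        rcases List.mem_cons.1 h1 with rfl | h1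
        · exact absurd List.mem_cons_self h2
        · exact ⟨h1, fun hc => h2 (List.mem_cons_of_mem _ hc)⟩
  | case4 x xs y ys hne hlt ih =>
    intro hx hy
    obtain ⟨ih1, ih2, ih3⟩ := ih (List.pairwise_cons.1 hx).2 hy
    have hygt : ∀ b ∈ ys, y < b := (List.pairwise_cons.1 hy).1
    have hxnot : x ∉ y :: ys := by
      intro hc
      rcases List.mem_cons.1 hc with rfl | hc
      · exact hne rfl
      · exact absurd (lt_trans hlt (hygt x hc)) (lt_irrefl x)
    rw [pvMerge3_eq_lt x y xs ys hne hlt]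
    constructor
    · rw [ih1]
      constructor
      · rintro ⟨h1, h2⟩; exact ⟨List.mem_cons_of_mem _ h1, h2⟩
      · rintro ⟨h1, h2⟩
        rcases List.mem_cons.1 h1 with rfl | h1
        · exact absurd h2 hxnot
        · exact ⟨h1, h2⟩
    constructor
    · simp only [List.mem_cons, ih2]
      have hxnot' : ¬(x = y ∨ x ∈ ys) := by simpa using hxnot
      constructor
      · rintro (rfl | ⟨h1, h2⟩)
        · exact ⟨Or.inl rfl, hxnot'⟩
        · exact ⟨Or.inr h1, by simpa using h2⟩
      · rintro ⟨rfl | h1, h2⟩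
        · exact Or.inl rfl
        · exact Or.inr ⟨h1, by simpa using h2⟩
    · rw [ih3]
      constructor
      · rintro ⟨h1, h2⟩
        exact ⟨h1, by
          intro hc
          rcases List.mem_cons.1 hc with rfl | hc
          · exact hxnot h1
          · exact h2 hc⟩
      · rintro ⟨h1, h2⟩
        exact ⟨h1, fun hc => h2 (List.mem_cons_of_mem _ hc)⟩
  | case5 x xs y ys hne hnlt ih =>
    intro hx hy
    obtain ⟨ih1, ih2, ih3⟩ := ih hx (List.pairwise_cons.1 hy).2
    have hxgt : ∀ b ∈ xs, x < b := (List.pairwise_cons.1 hx).1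
    have hlt : y < x := lt_of_le_of_ne (not_lt.1 hnlt) (fun hc => hne hc.symm)
    have hynot : y ∉ x :: xs := by
      intro hc
      rcases List.mem_cons.1 hc with rfl | hc
      · exact hne rfl
      · exact absurd (lt_trans hlt (hxgt y hc)) (lt_irrefl y)
    rw [pvMerge3_eq_gt x y xs ys hne hnlt]
    constructor
    · rw [ih1]
      constructor
      · rintro ⟨h1, h2⟩; exact ⟨h1, List.mem_cons_of_mem _ h2⟩
      · rintro ⟨h1, h2⟩
        rcases List.mem_cons.1 h2 with rfl | h2
        · exact absurd h1 hynot
        · exact ⟨h1, h2⟩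
    constructor
    · rw [ih2]
      constructor
      · rintro ⟨h1, h2⟩
        exact ⟨h1, by
          intro hc
          rcases List.mem_cons.1 hc with rfl | hc
          · exact hynot h1
          · exact h2 hc⟩
      · rintro ⟨h1, h2⟩
        exact ⟨h1, fun hc => h2 (List.mem_cons_of_mem _ hc)⟩
    · simp only [List.mem_cons, ih3]
      have hynot' : ¬(y = x ∨ y ∈ xs) := by simpa using hynot
      constructor
      · rintro (rfl | ⟨h1, h2⟩)
        · exact ⟨Or.inl rfl, hynot'⟩
        · exact ⟨Or.inr h1, by simpa using h2⟩
      · rintro ⟨rfl | h1, h2⟩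
        · exact Or.inl rfl
        · exact Or.inr ⟨h1, by simpa using h2⟩

-- the merge's outputs are strictly sorted when its inputs are
theorem pvMerge3_pairwise (xs ys : List String) :
    xs.Pairwise (· < ·) → ys.Pairwise (· < ·) →
    ((pvMerge3 xs ys).1.Pairwise (· < ·) ∧
     (pvMerge3 xs ys).2.1.Pairwise (· < ·) ∧
     (pvMerge3 xs ys).2.2.Pairwise (· < ·)) := by
  induction xs, ys using pvMerge3.induct with
  | case1 ys => intro _ hy; simpa [pvMerge3] using hy
  | case2 x xs => intro hx _; simpa [pvMerge3] using hx
  | case3 xs y ys ih =>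
    intro hx hy
    obtain ⟨ih1, ih2, ih3⟩ := ih (List.pairwise_cons.1 hx).2 (List.pairwise_cons.1 hy).2
    rw [pvMerge3_eq_tie]
    refine ⟨List.pairwise_cons.2 ⟨?_, ih1⟩, ih2, ih3⟩
    intro a ha
    have := ((pvMerge3_mem a xs ys (List.pairwise_cons.1 hx).2 (List.pairwise_cons.1 hy).2).1.1 ha).1
    exact (List.pairwise_cons.1 hx).1 a this
  | case4 x xs y ys hne hlt ih =>
    intro hx hy
    obtain ⟨ih1, ih2, ih3⟩ := ih (List.pairwise_cons.1 hx).2 hy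
    rw [pvMerge3_eq_lt x y xs ys hne hlt]
    refine ⟨ih1, List.pairwise_cons.2 ⟨?_, ih2⟩, ih3⟩
    intro a ha
    have hmem := ((pvMerge3_mem a xs (y :: ys) (List.pairwise_cons.1 hx).2 hy).2.1.1 ha).1
    exact (List.pairwise_cons.1 hx).1 a hmem
  | case5 x xs y ys hne hnlt ih =>
    intro hx hy
    obtain ⟨ih1, ih2, ih3⟩ := ih hx (List.pairwise_cons.1 hy).2
    rw [pvMerge3_eq_gt x y xs ys hne hnlt]
    refine ⟨ih1, ih2, List.pairwise_cons.2 ⟨?_, ih3⟩⟩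
    intro a ha
    have hmem := ((pvMerge3_mem a (x :: xs) ys hx (List.pairwise_cons.1 hy).2).2.2.1 ha).1
    exact (List.pairwise_cons.1 hy).1 a hmem

-- sorted(S) = L when L is strictly sorted, duplicate-free and has the same members as S
theorem pvSorted_eq_of_mem_iff (S L : List String) (hS : S.Nodup)
    (hL : L.Pairwise (· < ·)) (hmem : ∀ a, a ∈ L ↔ a ∈ S) :
    PySem.List.sorted S (fun x => x) false = L := by
  refine PySem.List.sorted_eq_of_perm_of_pairwise_lt S L (fun x => x) ?_ (by simpa using hL)
  exact (List.perm_ext_iff_of_nodup (hL.imp ne_of_lt) hS).2 hmem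

-- ===== VERDICT (by name: the statement is the Claim_ definition above) =====
theorem compute_skill_gaps_spec : Claim_equal_compute_skill_gaps := by
  intro jd cand _
  unfold Spec_compute_skill_gaps compute_skill_gaps compute_skill_gaps_alt
  have hx := pvSortDedup_pairwise jd
  have hy := pvSortDedup_pairwise cand
  obtain ⟨p1, p2, p3⟩ := pvMerge3_pairwise _ _ hx hy
  have hmem := fun a => pvMerge3_mem a _ _ hx hy
  have hjd : ∀ a, a ∈ pvSortDedup jd ↔ a ∈ PySem.Set.ofList (jd.map PySem.Str.lower) := by
    intro a; rw [pvMem_sortDedup, PySem.Set.mem_ofList]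
  have hcand : ∀ a, a ∈ pvSortDedup cand ↔ a ∈ PySem.Set.ofList (cand.map PySem.Str.lower) := by
    intro a; rw [pvMem_sortDedup, PySem.Set.mem_ofList]
  simp only [List.cons.injEq, Prod.mk.injEq, and_true, true_and]
  refine ⟨?_, ?_, ?_⟩
  · refine pvSorted_eq_of_mem_iff _ _ (PySem.Set.nodup_inter _ _ (PySem.Set.nodup_ofList _)) p1 ?_
    intro a
    rw [(hmem a).1, PySem.Set.mem_inter, ← hjd, ← hcand]
  · refine pvSorted_eq_of_mem_iff _ _ (PySem.Set.nodup_diff _ _ (PySem.Set.nodup_ofList _)) p2 ?_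
    intro a
    rw [(hmem a).2.1, PySem.Set.mem_diff, ← hjd, ← hcand]
  · refine pvSorted_eq_of_mem_iff _ _ (PySem.Set.nodup_diff _ _ (PySem.Set.nodup_ofList _)) p3 ?_
    intro a
    rw [(hmem a).2.2, PySem.Set.mem_diff, ← hjd, ← hcand]
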